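-- pv_equiv track=rewrite | github.com/k-ranasinghe/Introduction-to-Artificial-Intelligence | Assignment_1/test1.py | is_valid_solution
-- ===== SOURCE A (Python) =====
-- def is_valid_solution(solution):
--     visited_nodes = set()
--     for truck_route in solution:
--         for node in truck_route:
--             if node in visited_nodes:
--                 return False
--             visited_nodes.add(node)
--     return True
-- ===== SOURCE B (Python) =====
-- def is_valid_solution(solution):
--     nodes = sorted(node for route in solution for node in route)
--     return all(nodes[i] < nodes[i + 1] for i in range(len(nodes) - 1))
-- ===== Notes on version B (the rewrite author's own statement) =====
-- stated objective: alternative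
-- what changed: Replaces the hash-set membership scan with early return by a sort of the flattened node list followed by a strict-increase check of adjacent neighbours (no set at all).
import Mathlib
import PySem

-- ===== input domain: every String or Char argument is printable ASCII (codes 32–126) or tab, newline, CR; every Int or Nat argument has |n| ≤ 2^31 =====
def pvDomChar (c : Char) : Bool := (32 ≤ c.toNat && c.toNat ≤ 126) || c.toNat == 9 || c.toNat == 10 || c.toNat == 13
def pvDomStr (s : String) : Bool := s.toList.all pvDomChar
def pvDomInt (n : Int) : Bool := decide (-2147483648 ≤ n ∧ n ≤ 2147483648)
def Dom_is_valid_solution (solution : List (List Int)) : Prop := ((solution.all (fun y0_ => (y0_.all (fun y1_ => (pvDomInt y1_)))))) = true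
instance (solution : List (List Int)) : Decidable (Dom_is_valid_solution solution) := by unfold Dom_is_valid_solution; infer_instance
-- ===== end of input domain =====

-- B replaces A's set-membership scan by sorting the flattened node list and checking
-- strict increase between adjacent neighbours (no set); same result, alternative algorithm.

-- ===== PORT A =====
-- inner 'for node in truck_route' loop: returns none on the early 'return False',
-- otherwise the updated visited set
def pvVisitRoute (visited : PySem.Set Int) : List Int → Option (PySem.Set Int)
  | [] => some visited
  | node :: rest =>
      if PySem.Set.contains visited node then none
      else pvVisitRoute (PySem.Set.add visited node) rest

-- outer 'for truck_route in solution' loop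
def pvVisitAll (visited : PySem.Set Int) : List (List Int) → Bool
  | [] => true
  | route :: routes =>
      match pvVisitRoute visited route with
      | none => false
      | some v => pvVisitAll v routes

def is_valid_solution (solution : List (List Int)) : Bool :=
  pvVisitAll PySem.Set.empty solution

-- ===== PORT B =====
-- 'all(nodes[i] < nodes[i+1] for i in range(len(nodes)-1))': adjacent-pair scan
def pvAdjStrictLt : List Int → Bool
  | [] => true
  | [_] => true
  | a :: b :: rest => a < b && pvAdjStrictLt (b :: rest)

def is_valid_solution_alt (solution : List (List Int)) : Bool :=
  let nodes := PySem.List.sorted (solution.flatMap (fun route => route)) (fun x => x) false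
  pvAdjStrictLt nodes

-- ===== PRECONDITION & SPEC =====
def Spec_is_valid_solution (solution : List (List Int)) (out : Bool) : Prop := out = is_valid_solution_alt solution
instance (solution : List (List Int)) (out : Bool) : Decidable (Spec_is_valid_solution solution out) := by unfold Spec_is_valid_solution; infer_instance

-- ===== CLAIM (what is proved, stated in full; the proofs are below) =====
def Claim_equal_is_valid_solution : Prop := ∀ (solution : List (List Int)), Dom_is_valid_solution solution → Spec_is_valid_solution solution (is_valid_solution solution)

-- ===== LEMMAS AND PROOFS =====

theorem pvVisitRoute_eq (r : List Int) : ∀ (v : List Int), v.Nodup →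
    pvVisitRoute v r = if (v ++ r).Nodup then some (v ++ r) else none := by
  induction r with
  | nil => intro v hv; simp [pvVisitRoute, hv]
  | cons a rest ih =>
      intro v hv
      by_cases ha : a ∈ v
      · have hc : PySem.Set.contains v a = true := by simp [ha]
        have hnot : ¬ (v ++ a :: rest).Nodup := fun h =>
          (List.disjoint_of_nodup_append h) ha List.mem_cons_self
        rw [pvVisitRoute, hc]
        simp [hnot]
      · have hc : PySem.Set.contains v a = false := by simp [ha]
        have hadd : PySem.Set.add v a = v ++ [a] := PySem.Set.add_of_not_mem ha
        have hv' : (v ++ [a]).Nodup := by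
          simp [List.nodup_append, hv]
          exact fun x hx hxa => ha (hxa ▸ hx)
        rw [pvVisitRoute, hc, hadd]
        simp only [Bool.false_eq_true, if_false]
        rw [ih _ hv']
        simp [List.append_assoc]

theorem pvVisitAll_eq (rs : List (List Int)) : ∀ (v : List Int), v.Nodup →
    pvVisitAll v rs = decide ((v ++ rs.flatMap (fun r => r)).Nodup) := by
  induction rs with
  | nil => intro v hv; simp [pvVisitAll, hv]
  | cons r rest ih =>
      intro v hv
      rw [pvVisitAll, pvVisitRoute_eq r v hv]
      by_cases h : (v ++ r).Nodup
      · rw [if_pos h]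
        show pvVisitAll (v ++ r) rest = _
        rw [ih _ h]
        simp [List.append_assoc]
      · rw [if_neg h]
        have hnot : ¬ (v ++ (r :: rest).flatMap (fun r => r)).Nodup := by
          intro hn
          apply h
          have hsub : (v ++ r).Sublist (v ++ (r :: rest).flatMap (fun r => r)) := by
            simp only [List.flatMap_cons, ← List.append_assoc]
            exact List.sublist_append_left _ _
          exact hn.sublist hsub
        symm
        rw [decide_eq_false_iff_not]
        exact hnot

-- the adjacent-pair scan decides Chain' (<)
theorem pvAdjStrictLt_eq_chain : ∀ (l : List Int), pvAdjStrictLt l = decide (l.IsChain (· < ·)) := by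
  intro l
  induction l with
  | nil => simp [pvAdjStrictLt]
  | cons a t ih =>
      cases t with
      | nil => simp [pvAdjStrictLt]
      | cons b rest =>
          rw [pvAdjStrictLt, ih]
          by_cases hab : a < b <;> simp [List.isChain_cons_cons, hab]

-- for a weakly sorted list, strict adjacent increase ↔ no duplicates
theorem chain_lt_iff_nodup_of_pairwise_le (l : List Int) (hle : l.Pairwise (· ≤ ·)) :
    l.IsChain (· < ·) ↔ l.Nodup := by
  rw [List.isChain_iff_pairwise]
  constructor
  · intro h; exact h.imp (fun hlt => ne_of_lt hlt)
  · intro h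
    have := hle.and h
    exact this.imp (fun ⟨h1, h2⟩ => lt_of_le_of_ne h1 h2)

-- ===== VERDICT (by name: the statement is the Claim_ definition above) =====
theorem is_valid_solution_spec : Claim_equal_is_valid_solution := by
  intro solution _
  unfold Spec_is_valid_solution is_valid_solution is_valid_solution_alt
  rw [pvVisitAll_eq solution PySem.Set.empty (by simp [PySem.Set.empty])]
  simp only [PySem.Set.empty, List.nil_append]
  set l := solution.flatMap (fun r => r) with hl
  set s := PySem.List.sorted l (fun x => x) false with hs
  rw [pvAdjStrictLt_eq_chain]
  have hperm : s.Perm l := PySem.List.sorted_perm l (fun x => x) false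
  have hpw : s.Pairwise (fun a b => (fun x => x) a ≤ (fun x => x) b) :=
    PySem.List.sorted_pairwise l (fun x => x)
  have : s.IsChain (· < ·) ↔ l.Nodup := by
    rw [chain_lt_iff_nodup_of_pairwise_le s hpw]
    exact hperm.nodup_iff
  by_cases h : l.Nodup <;> simp [h, this]
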